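-- pv_equiv track=rewrite | github.com/pypi-data/pypi-mirror-402 | packages/structural-lib-is456/structural_lib_is456-0.18.0.tar.gz/structural_lib_is456-0.18.0/structural_lib/bbs.py | _normalize_member_id
-- ===== SOURCE A (Python) =====
-- def _normalize_member_id(member_id: str) -> str:
--     """Normalize member IDs for deterministic bar mark formatting."""
--     if member_id is None:
--         return "UNKNOWN"
--     cleaned = []
--     for ch in str(member_id).strip().upper():
--         if ch.isalnum():
--             cleaned.append(ch)
--         elif ch in (" ", "-", "_"):
--             cleaned.append("-")
--     result = "".join(cleaned)
--     while "--" in result: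
--         result = result.replace("--", "-")
--     result = result.strip("-")
--     return result if result else "UNKNOWN"
-- ===== SOURCE B (Python) =====
-- def _normalize_member_id(member_id: str) -> str:
--     """Normalize member IDs for deterministic bar mark formatting.
--
--     One pass: collapse separators to a single dash while scanning, never
--     emitting a leading dash or a doubled dash; pop one trailing dash at the end.
--     """
--     if member_id is None:
--         return "UNKNOWN"
--     out = []
--     for ch in str(member_id).strip().upper():
--         if ch.isalnum():
--             out.append(ch)
--         elif ch in (" ", "-", "_"):
--             if out and out[-1] != "-":
--                 out.append("-")
--     if out and out[-1] == "-":
--         out.pop()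
--     return "".join(out) if out else "UNKNOWN"
-- ===== Notes on version B (the rewrite author's own statement) =====
-- stated objective: simpler
-- what changed: Replaces the build-then-rescan pipeline (repeatedly collapsing doubled dashes with replace, then stripping edge dashes) by a single scan that suppresses leading and doubled dashes as it appends and pops at most one trailing dash.
import Mathlib
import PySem

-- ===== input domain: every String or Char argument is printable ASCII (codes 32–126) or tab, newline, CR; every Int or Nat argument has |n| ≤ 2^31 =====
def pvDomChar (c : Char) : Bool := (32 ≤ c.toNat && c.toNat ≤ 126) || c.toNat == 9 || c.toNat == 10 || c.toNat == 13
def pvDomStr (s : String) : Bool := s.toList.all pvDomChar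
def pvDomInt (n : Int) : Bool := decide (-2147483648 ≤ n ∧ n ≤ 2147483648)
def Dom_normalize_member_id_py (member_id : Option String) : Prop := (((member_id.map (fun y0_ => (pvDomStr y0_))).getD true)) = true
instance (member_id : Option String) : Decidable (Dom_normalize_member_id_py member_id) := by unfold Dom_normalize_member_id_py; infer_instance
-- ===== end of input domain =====

-- B replaces A's build-then-rescan pipeline (repeatedly collapsing doubled dashes, then stripping
-- edge dashes) with a single scan that suppresses leading/doubled dashes inline and pops at most
-- one trailing dash (objective: simpler).

-- ===== PORT A =====

-- pvRep mirrors ONE left-to-right pass of Python's result.replace of double dash by dash.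
-- It and the three lemmas below exist only to justify termination of A's
-- `while "--" in result` loop (pvCollapseA cites them in decreasing_by).
def pvRep : List Char → List Char
  | [] => []
  | [c] => [c]
  | c :: d :: t =>
    if c = '-' ∧ d = '-' then '-' :: pvRep t else c :: pvRep (d :: t)

theorem pvGo_eq (fuel : Nat) : ∀ (l acc : List Char), l.length ≤ fuel →
    PySem.Chars.replace.go ['-', '-'] ['-'] fuel l acc = acc.reverse ++ pvRep l := by
  induction fuel with
  | zero =>
    intro l acc h
    have hl : l = [] := by cases l <;> simp_all
    subst hl
    rw [PySem.Chars.replace.go.eq_def]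
    simp [pvRep]
  | succ n ih =>
    intro l acc h
    match l with
    | [] => rw [PySem.Chars.replace.go.eq_def]; simp [pvRep]
    | [c] =>
      rw [PySem.Chars.replace.go.eq_def]
      have hpre : List.isPrefixOf ['-', '-'] [c] = false := by
        simp [List.isPrefixOf]
      simp only [hpre, Bool.false_eq_true, if_false]
      rw [ih [] (c :: acc) (by simp)]
      simp [pvRep]
    | c :: d :: t =>
      rw [PySem.Chars.replace.go.eq_def]
      by_cases hcd : c = '-' ∧ d = '-'
      · obtain ⟨hc, hd⟩ := hcd
        subst hc; subst hd
        have hpre : List.isPrefixOf ['-', '-'] ('-' :: '-' :: t) = true := by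
          simp [List.isPrefixOf]
        simp only [hpre, if_true, List.length_cons, List.drop_succ_cons, List.drop_zero,
          List.length_nil]
        rw [ih t (['-'].reverse ++ acc) (by simp at h ⊢; omega)]
        simp [pvRep]
      · have hpre : List.isPrefixOf ['-', '-'] (c :: d :: t) = false := by
          simp [List.isPrefixOf]
          intro hc hd; exact hcd ⟨hc.symm, hd.symm⟩
        simp only [hpre, Bool.false_eq_true, if_false]
        rw [ih (d :: t) (c :: acc) (by simp at h ⊢; omega)]
        simp [pvRep, hcd]

theorem pvReplace_eq_rep (l : List Char) :
    PySem.Chars.replace l ['-', '-'] ['-'] = pvRep l := by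
  rw [PySem.Chars.replace]
  simp only [List.isEmpty_cons, Bool.false_eq_true, if_false]
  rw [pvGo_eq l.length l [] le_rfl]
  simp

theorem pvRep_len_le (l : List Char) : (pvRep l).length ≤ l.length := by
  fun_induction pvRep l with
  | case1 => simp
  | case2 c => simp
  | case3 c d t hcd ih => simp; omega
  | case4 c d t hcd ih => simp at ih ⊢; omega

theorem pvRep_len_lt (l : List Char) (h : ['-', '-'] <:+: l) :
    (pvRep l).length < l.length := by
  fun_induction pvRep l with
  | case1 => exact absurd (List.IsInfix.length_le h) (by simp)
  | case2 c => exact absurd (List.IsInfix.length_le h) (by simp)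
  | case3 c d t hcd ih =>
    have := pvRep_len_le t
    simp; omega
  | case4 c d t hcd ih =>
    rcases List.infix_cons_iff.mp h with hpre | hinf
    · rcases hpre with ⟨r, hr⟩
      simp at hr
      exact absurd ⟨hr.1.symm, hr.2.1.symm⟩ hcd
    · have := ih hinf
      simp at this ⊢; omega

-- A's while-loop (replace doubled dashes until none remain), literally.
def pvCollapseA (l : List Char) : List Char :=
  if PySem.Chars.isIn ['-', '-'] l then
    pvCollapseA (PySem.Chars.replace l ['-', '-'] ['-'])
  else l
termination_by l.length
decreasing_by
  rw [pvReplace_eq_rep]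
  exact pvRep_len_lt l ((PySem.Chars.isIn_iff_infix _ _).mp (by assumption))

def normalize_member_id_py (member_id : Option String) : String :=
  match member_id with
  | none => "UNKNOWN"
  | some s =>
    -- for ch in str(member_id).strip().upper(): build `cleaned`
    let cleaned := (PySem.Chars.upper (PySem.Chars.strip s.toList)).foldl
      (fun acc ch =>
        if PySem.Chars.isalnum ch then acc ++ [ch]
        else if ch == ' ' || ch == '-' || ch == '_' then acc ++ ['-']
        else acc) []
    let result := pvCollapseA cleaned
    let result := PySem.Chars.stripChars result ['-']
    if result.isEmpty then "UNKNOWN" else String.ofList result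

-- ===== PORT B =====

def normalize_member_id_py_alt (member_id : Option String) : String :=
  match member_id with
  | none => "UNKNOWN"
  | some s =>
    -- single scan: append alnum chars; for a separator append '-' only when out is
    -- nonempty and does not already end in '-'; afterwards pop one trailing dash
    let out := (PySem.Chars.upper (PySem.Chars.strip s.toList)).foldl
      (fun out ch =>
        if PySem.Chars.isalnum ch then out ++ [ch]
        else if ch == ' ' || ch == '-' || ch == '_' then
          (if out ≠ [] ∧ out.getLast? ≠ some '-' then out ++ ['-'] else out)
        else out) []
    let out := if out.getLast? = some '-' then out.dropLast else out
    if out.isEmpty then "UNKNOWN" else String.ofList out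

-- ===== PRECONDITION & SPEC =====
def Spec_normalize_member_id_py (member_id : Option String) (out : String) : Prop := out = normalize_member_id_py_alt member_id
instance (member_id : Option String) (out : String) : Decidable (Spec_normalize_member_id_py member_id out) := by unfold Spec_normalize_member_id_py; infer_instance

-- ===== CLAIM (what is proved, stated in full; the proofs are below) =====
def Claim_equal_normalize_member_id_py : Prop := ∀ (member_id : Option String), Dom_normalize_member_id_py member_id → Spec_normalize_member_id_py member_id (normalize_member_id_py member_id)

-- ===== LEMMAS AND PROOFS =====

-- collapse every run of dashes to a single dash: the common normal form both sides reach
def pvSqueeze : List Char → List Char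
  | [] => []
  | c :: t => if c = '-' ∧ t.head? = some '-' then pvSqueeze t else c :: pvSqueeze t

theorem pvSqueeze_head? (l : List Char) : (pvSqueeze l).head? = l.head? := by
  fun_induction pvSqueeze l <;> simp_all

theorem pvRep_head? (l : List Char) : (pvRep l).head? = l.head? := by
  fun_induction pvRep l <;> simp_all

theorem pvSqueeze_rep (l : List Char) : pvSqueeze (pvRep l) = pvSqueeze l := by
  fun_induction pvRep l with
  | case1 => rfl
  | case2 c => rfl
  | case3 c d t hcd ih =>
    obtain ⟨hc, hd⟩ := hcd; subst hc; subst hd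
    by_cases ht : t.head? = some '-'
    · simp [pvSqueeze, pvRep_head?, ht, ih]
    · simp [pvSqueeze, pvRep_head?, ht, ih]
  | case4 c d t hcd ih =>
    simp [pvSqueeze, pvRep_head?, hcd, ih]

theorem pvSqueeze_of_noDD (l : List Char) (h : ¬ ['-', '-'] <:+: l) : pvSqueeze l = l := by
  induction l with
  | nil => rfl
  | cons c t ih =>
    by_cases hc : c = '-' ∧ t.head? = some '-'
    · exfalso; apply h
      obtain ⟨hc1, hc2⟩ := hc
      cases t with
      | nil => simp at hc2
      | cons d t' =>
        simp at hc2
        subst hc1; subst hc2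
        exact (⟨[], t', rfl⟩ : ['-', '-'] <:+: '-' :: '-' :: t')
    · rw [pvSqueeze, if_neg hc, ih (fun hi => h (List.infix_cons hi))]

theorem pvCollapseA_eq_squeeze (l : List Char) : pvCollapseA l = pvSqueeze l := by
  induction hn : l.length using Nat.strong_induction_on generalizing l with
  | _ n ih =>
    subst hn
    rw [pvCollapseA]
    by_cases h : PySem.Chars.isIn ['-', '-'] l = true
    · rw [if_pos h, pvReplace_eq_rep,
        ih (pvRep l).length (pvRep_len_lt l ((PySem.Chars.isIn_iff_infix _ _).mp h)) (pvRep l) rfl,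
        pvSqueeze_rep]
    · rw [if_neg h]
      exact (pvSqueeze_of_noDD l ((PySem.Chars.isIn_eq_false_iff _ _).mp (by simpa using h))).symm

theorem pvSqueeze_noDD (l : List Char) : ¬ ['-', '-'] <:+: pvSqueeze l := by
  induction l with
  | nil => simp [pvSqueeze]
  | cons c t ih =>
    rw [pvSqueeze]
    split
    · exact ih
    · next hc =>
      intro hinf
      rcases List.infix_cons_iff.mp hinf with hpre | hinf'
      · rcases hpre with ⟨r, hr⟩
        simp only [List.cons_append, List.nil_append] at hr
        injection hr with h1 h2
        apply hc
        refine ⟨h1.symm, ?_⟩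
        rw [← pvSqueeze_head?, ← h2]; simp
      · exact ih hinf'

theorem pvSqueeze_dash (l : List Char) :
    pvSqueeze ('-' :: l) = '-' :: pvSqueeze (l.dropWhile (fun c => c == '-')) := by
  induction l with
  | nil => rfl
  | cons d t ih =>
    by_cases hd : d = '-'
    · subst hd
      rw [pvSqueeze, if_pos (by simp), ih]
      simp
    · rw [pvSqueeze, if_neg (by simp [hd])]
      simp [hd]

theorem pvSqueeze_dropWhile (l : List Char) :
    (pvSqueeze l).dropWhile (fun c => c == '-') = pvSqueeze (l.dropWhile (fun c => c == '-')) := by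
  induction l with
  | nil => rfl
  | cons c t ih =>
    by_cases hc : c = '-'
    · subst hc
      rw [pvSqueeze_dash]
      simp only [List.dropWhile_cons, beq_self_eq_true, if_true]
      cases hu : t.dropWhile (fun c => c == '-') with
      | nil => simp [pvSqueeze]
      | cons e r =>
        have he : (e == '-') = false := by
          have := List.head?_dropWhile_not (fun c => c == '-') t
          rw [hu] at this; simpa using this
        rw [pvSqueeze, if_neg (by simp_all)]
        simp [he]
    · rw [pvSqueeze, if_neg (by simp [hc])]
      simp [hc, pvSqueeze]

-- one character of A's cleaning pass, as an Option
def pvTok (ch : Char) : Option Char :=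
  if PySem.Chars.isalnum ch then some ch
  else if ch == ' ' || ch == '-' || ch == '_' then some '-'
  else none

theorem pvFoldA_eq (cs : List Char) : ∀ (acc : List Char),
    cs.foldl (fun acc ch =>
        if PySem.Chars.isalnum ch then acc ++ [ch]
        else if ch == ' ' || ch == '-' || ch == '_' then acc ++ ['-']
        else acc) acc = acc ++ cs.filterMap pvTok := by
  induction cs with
  | nil => simp
  | cons ch cs ih =>
    intro acc
    simp only [List.foldl_cons]
    rw [ih, List.filterMap_cons]
    by_cases h1 : PySem.Chars.isalnum ch = true
    · simp [pvTok, h1]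
    · by_cases h2 : (ch == ' ' || ch == '-' || ch == '_') = true
      · simp [pvTok, h1, h2]
      · simp [pvTok, h1, h2]

-- B's step on the token alphabet
def pvG (out : List Char) (c : Char) : List Char :=
  if c = '-' then (if out ≠ [] ∧ out.getLast? ≠ some '-' then out ++ ['-'] else out)
  else out ++ [c]

theorem pvIsalnum_ne_dash (ch : Char) (h : PySem.Chars.isalnum ch = true) : ch ≠ '-' := by
  intro he; subst he; exact absurd h (by decide)

theorem pvFoldB_eq (cs : List Char) : ∀ (acc : List Char),
    cs.foldl (fun out ch =>
        if PySem.Chars.isalnum ch then out ++ [ch]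
        else if ch == ' ' || ch == '-' || ch == '_' then
          (if out ≠ [] ∧ out.getLast? ≠ some '-' then out ++ ['-'] else out)
        else out) acc = (cs.filterMap pvTok).foldl pvG acc := by
  induction cs with
  | nil => simp
  | cons ch cs ih =>
    intro acc
    simp only [List.foldl_cons]
    rw [ih, List.filterMap_cons]
    by_cases h1 : PySem.Chars.isalnum ch = true
    · have hne := pvIsalnum_ne_dash ch h1
      simp [pvTok, pvG, h1, hne]
    · by_cases h2 : (ch == ' ' || ch == '-' || ch == '_') = true
      · simp [pvTok, pvG, h1, h2]
      · simp [pvTok, h1, h2]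

theorem pvFoldG_dash (T : List Char) : ∀ (acc : List Char), acc.getLast? = some '-' →
    T.foldl pvG acc = (T.dropWhile (fun c => c == '-')).foldl pvG acc := by
  induction T with
  | nil => intro acc _; rfl
  | cons c T ih =>
    intro acc h
    by_cases hc : c = '-'
    · subst hc
      simp only [List.foldl_cons, List.dropWhile_cons, beq_self_eq_true, if_true]
      rw [pvG, if_pos rfl, if_neg (by simp [h])]
      exact ih acc h
    · simp [hc]

theorem pvFoldG_inv (T : List Char) : ∀ (acc : List Char), acc ≠ [] → acc.getLast? ≠ some '-' →
    T.foldl pvG acc = acc ++ pvSqueeze T := by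
  induction hn : T.length using Nat.strong_induction_on generalizing T with
  | _ n ihn =>
    subst hn
    cases T with
    | nil => intro acc _ _; simp [pvSqueeze]
    | cons c T =>
      intro acc h1 h2
      by_cases hc : c = '-'
      · subst hc
        simp only [List.foldl_cons]
        rw [pvG, if_pos rfl, if_pos ⟨h1, h2⟩]
        rw [pvFoldG_dash T (acc ++ ['-']) (by simp)]
        rw [pvSqueeze_dash]
        cases hu : T.dropWhile (fun c => c == '-') with
        | nil => simp [pvSqueeze]
        | cons e r =>
          have he : (e == '-') = false := by
            have := List.head?_dropWhile_not (fun c => c == '-') T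
            rw [hu] at this; simpa using this
          have he' : e ≠ '-' := by simpa using he
          have hrlen : r.length < (('-') :: T).length := by
            have := List.length_dropWhile_le (fun c => c == '-') T
            rw [hu] at this; simp at this ⊢; omega
          simp only [List.foldl_cons]
          rw [pvG, if_neg he']
          rw [ihn r.length hrlen r rfl (acc ++ ['-'] ++ [e]) (by simp) (by simp [he'])]
          rw [pvSqueeze, if_neg (by simp [he'])]
          simp
      · simp only [List.foldl_cons]
        rw [pvG, if_neg hc]
        rw [ihn T.length (by simp) T rfl (acc ++ [c]) (by simp) (by simp [hc])]
        rw [pvSqueeze, if_neg (by simp [hc])]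
        simp

theorem pvFoldG_nil (T : List Char) :
    T.foldl pvG [] = pvSqueeze (T.dropWhile (fun c => c == '-')) := by
  induction T with
  | nil => rfl
  | cons c T ih =>
    by_cases hc : c = '-'
    · subst hc
      simp only [List.foldl_cons, List.dropWhile_cons, beq_self_eq_true, if_true]
      rw [pvG, if_pos rfl, if_neg (by simp)]
      exact ih
    · simp only [List.foldl_cons, List.dropWhile_cons]
      rw [pvG, if_neg hc]
      simp only [List.nil_append]
      rw [pvFoldG_inv T [c] (by simp) (by simp [hc])]
      rw [if_neg (by simp [hc])]
      rw [pvSqueeze, if_neg (by simp [hc])]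
      simp

theorem pvRstrip_eq_pop (y : List Char) (h : ¬ ['-', '-'] <:+: y) :
    ((y.reverse.dropWhile (fun c => c == '-')).reverse) =
      (if y.getLast? = some '-' then y.dropLast else y) := by
  have hr : ¬ ['-', '-'] <:+: y.reverse := by
    intro hinf
    exact h (List.reverse_infix.mp (by simpa using hinf))
  rw [← List.reverse_inj]
  rw [List.reverse_reverse, ← List.head?_reverse, apply_ite List.reverse,
    ← List.tail_reverse]
  generalize y.reverse = r at hr
  cases r with
  | nil => simp
  | cons c rest =>
    by_cases hc : c = '-'
    · subst hc
      have hrest : rest.dropWhile (fun c => c == '-') = rest := by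
        cases rest with
        | nil => rfl
        | cons e r2 =>
          have he : e ≠ '-' := by
            intro he; subst he
            exact hr ⟨[], r2, rfl⟩
          simp [he]
      simp only [List.dropWhile_cons, beq_self_eq_true, if_true, List.head?_cons,
        List.tail_cons, hrest]
    · simp only [List.dropWhile_cons, List.head?_cons, List.tail_cons]
      rw [if_neg (by simp [hc]), if_neg (by simp [hc])]

theorem pvStripChars_eq (s : List Char) :
    PySem.Chars.stripChars s ['-'] =
      (((s.dropWhile (fun c => c == '-')).reverse.dropWhile (fun c => c == '-')).reverse) := by
  rw [PySem.Chars.stripChars]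
  have : (fun c => List.contains ['-'] c) = (fun c : Char => c == '-') := by
    funext c
    by_cases h : c = '-'
    · subst h; rfl
    · simp only [List.contains_eq_mem, List.mem_singleton]
      simp [h]
  simp only [this]

theorem pvLists_eq (cs : List Char) :
    PySem.Chars.stripChars (pvCollapseA (cs.foldl
      (fun acc ch =>
        if PySem.Chars.isalnum ch then acc ++ [ch]
        else if ch == ' ' || ch == '-' || ch == '_' then acc ++ ['-']
        else acc) [])) ['-'] =
    (let o := cs.foldl
      (fun out ch =>
        if PySem.Chars.isalnum ch then out ++ [ch]
        else if ch == ' ' || ch == '-' || ch == '_' then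
          (if out ≠ [] ∧ out.getLast? ≠ some '-' then out ++ ['-'] else out)
        else out) [];
     if o.getLast? = some '-' then o.dropLast else o) := by
  rw [pvFoldA_eq, pvFoldB_eq, List.nil_append, pvFoldG_nil, pvCollapseA_eq_squeeze,
    pvStripChars_eq, pvSqueeze_dropWhile,
    pvRstrip_eq_pop _ (pvSqueeze_noDD _)]

-- ===== VERDICT (by name: the statement is the Claim_ definition above) =====
theorem normalize_member_id_py_spec : Claim_equal_normalize_member_id_py := by
  intro mid _
  unfold Spec_normalize_member_id_py
  cases mid with
  | none => rfl
  | some s =>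
    have h := pvLists_eq (PySem.Chars.upper (PySem.Chars.strip s.toList))
    simp only at h
    simp only [normalize_member_id_py, normalize_member_id_py_alt]
    rw [h]
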